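-- pv_equiv track=rewrite | github.com/kavezo/ZipZap | util/storyUtil.py | getEpisodeLevel
-- ===== SOURCE A (Python) =====
-- def getEpisodeLevel(userChara):
--     episodePoints = [0, 1000, 4000, 14000, 64000]
--     bondsTotalPt = userChara['bondsTotalPt']
--
--     level = -1
--     for i in range(len(episodePoints)):
--         if bondsTotalPt >= episodePoints[i]:
--             level = i+1
--     return level
-- ===== SOURCE B (Python) =====
-- def getEpisodeLevel(userChara):
--     pts = [0, 1000, 4000, 14000, 64000]
--     v = userChara['bondsTotalPt']
--     lo, hi = 0, len(pts)
--     while lo < hi: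
--         mid = (lo + hi) // 2
--         if pts[mid] <= v:
--             lo = mid + 1
--         else:
--             hi = mid
--     return lo if lo > 0 else -1
-- ===== Notes on version B (the rewrite author's own statement) =====
-- stated objective: alternative
-- what changed: Replaces the linear scan over all five thresholds with a binary search (bisect_right by hand) on the sorted threshold list, mapping result 0 back to the -1 sentinel.
import Mathlib
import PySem

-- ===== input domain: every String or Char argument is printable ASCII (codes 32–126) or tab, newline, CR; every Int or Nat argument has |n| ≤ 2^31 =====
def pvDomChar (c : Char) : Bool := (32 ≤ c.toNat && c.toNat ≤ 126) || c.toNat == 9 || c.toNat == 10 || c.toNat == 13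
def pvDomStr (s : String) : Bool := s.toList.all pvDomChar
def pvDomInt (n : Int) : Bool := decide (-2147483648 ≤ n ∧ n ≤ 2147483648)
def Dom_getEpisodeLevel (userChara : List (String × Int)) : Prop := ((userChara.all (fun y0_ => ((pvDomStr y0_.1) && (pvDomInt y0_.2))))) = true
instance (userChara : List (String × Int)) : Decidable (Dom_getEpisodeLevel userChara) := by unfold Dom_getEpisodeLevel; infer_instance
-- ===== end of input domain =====

-- ===== PORT A =====
-- B changes only the search strategy; getEpisodeLevel differs from getEpisodeLevel_alt in nothing else.
-- Port of A: linear scan, level := i+1 whenever bondsTotalPt >= episodePoints[i].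
def getEpisodeLevel (userChara : List (String × Int)) : Int :=
  let episodePoints : List Int := [0, 1000, 4000, 14000, 64000]
  -- userChara['bondsTotalPt']: KeyError excluded by Pre_; getD's default is unreachable there
  let bondsTotalPt : Int := (PySem.Dict.mk userChara).getD "bondsTotalPt" 0
  (PySem.List.pyRange 0 (episodePoints.length : Int) 1).foldl
    (fun level i =>
      if bondsTotalPt ≥ PySem.List.pyGetD episodePoints i 0 then i + 1 else level)
    (-1)

-- ===== PORT B =====
-- bisect_right written out as the standard lo/hi binary-search loop of Source B
def pvBisect (pts : List Int) (v : Int) (lo hi : Nat) : Nat :=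
  if _h : lo < hi then
    let mid := (lo + hi) / 2
    if pts.getD mid 0 ≤ v then pvBisect pts v (mid + 1) hi else pvBisect pts v lo mid
  else lo
termination_by hi - lo
decreasing_by all_goals omega

def getEpisodeLevel_alt (userChara : List (String × Int)) : Int :=
  let pts : List Int := [0, 1000, 4000, 14000, 64000]
  let v : Int := (PySem.Dict.mk userChara).getD "bondsTotalPt" 0
  let lo := pvBisect pts v 0 pts.length
  if lo > 0 then (lo : Int) else -1

-- ===== PRECONDITION & SPEC =====
-- Pre_ excludes exactly the dicts without the key 'bondsTotalPt', on which A raises KeyError.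
def Pre_getEpisodeLevel (userChara : List (String × Int)) : Prop :=
  ((PySem.Dict.mk userChara).contains "bondsTotalPt") = true
instance (userChara : List (String × Int)) : Decidable (Pre_getEpisodeLevel userChara) := by
  unfold Pre_getEpisodeLevel; infer_instance

def pvWitness_getEpisodeLevel : (List (String × Int)) := [("bondsTotalPt", 1000)]

def Spec_getEpisodeLevel (userChara : List (String × Int)) (out : Int) : Prop := out = getEpisodeLevel_alt userChara
instance (userChara : List (String × Int)) (out : Int) : Decidable (Spec_getEpisodeLevel userChara out) := by unfold Spec_getEpisodeLevel; infer_instance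

-- ===== CLAIM (what is proved, stated in full; the proofs are below) =====
def Claim_equal_getEpisodeLevel : Prop := ∀ (userChara : List (String × Int)), Dom_getEpisodeLevel userChara → Pre_getEpisodeLevel userChara → Spec_getEpisodeLevel userChara (getEpisodeLevel userChara)

-- ===== LEMMAS AND PROOFS =====
-- Evaluate B's binary search on each interval between consecutive thresholds.
lemma pvB_lt0 (v : Int) (h : v < 0) : pvBisect [0, 1000, 4000, 14000, 64000] v 0 5 = 0 := by
  rw [pvBisect]; norm_num [show ¬((4000:Int) ≤ v) from by omega]
  rw [pvBisect]; norm_num [show ¬((1000:Int) ≤ v) from by omega]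
  rw [pvBisect]; norm_num [show ¬((0:Int) ≤ v) from by omega]
  rw [pvBisect]; norm_num

lemma pvB_0 (v : Int) (h0 : (0:Int) ≤ v) (h1 : v < 1000) :
    pvBisect [0, 1000, 4000, 14000, 64000] v 0 5 = 1 := by
  rw [pvBisect]; norm_num [show ¬((4000:Int) ≤ v) from by omega]
  rw [pvBisect]; norm_num [show ¬((1000:Int) ≤ v) from by omega]
  rw [pvBisect]; norm_num [h0]
  rw [pvBisect]; norm_num

lemma pvB_1 (v : Int) (h0 : (1000:Int) ≤ v) (h1 : v < 4000) :
    pvBisect [0, 1000, 4000, 14000, 64000] v 0 5 = 2 := by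
  rw [pvBisect]; norm_num [show ¬((4000:Int) ≤ v) from by omega]
  rw [pvBisect]; norm_num [h0]
  rw [pvBisect]; norm_num

lemma pvB_2 (v : Int) (h0 : (4000:Int) ≤ v) (h1 : v < 14000) :
    pvBisect [0, 1000, 4000, 14000, 64000] v 0 5 = 3 := by
  rw [pvBisect]; norm_num [h0]
  rw [pvBisect]; norm_num [show ¬((64000:Int) ≤ v) from by omega]
  rw [pvBisect]; norm_num [show ¬((14000:Int) ≤ v) from by omega]
  rw [pvBisect]; norm_num

lemma pvB_3 (v : Int) (h0 : (14000:Int) ≤ v) (h1 : v < 64000) :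
    pvBisect [0, 1000, 4000, 14000, 64000] v 0 5 = 4 := by
  rw [pvBisect]; norm_num [show (4000:Int) ≤ v from by omega]
  rw [pvBisect]; norm_num [show ¬((64000:Int) ≤ v) from by omega]
  rw [pvBisect]; norm_num [h0]
  rw [pvBisect]; norm_num

lemma pvB_4 (v : Int) (h0 : (64000:Int) ≤ v) :
    pvBisect [0, 1000, 4000, 14000, 64000] v 0 5 = 5 := by
  rw [pvBisect]; norm_num [show (4000:Int) ≤ v from by omega]
  rw [pvBisect]; norm_num [h0]
  rw [pvBisect]; norm_num

-- Both results depend on the input only through the looked-up value v; compare the two scans for every v.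
lemma pv_core (v : Int) :
    (PySem.List.pyRange 0 (([0, 1000, 4000, 14000, 64000] : List Int).length : Int) 1).foldl
      (fun level i =>
        if v ≥ PySem.List.pyGetD ([0, 1000, 4000, 14000, 64000] : List Int) i 0 then i + 1 else level)
      (-1)
    = (let lo := pvBisect [0, 1000, 4000, 14000, 64000] v 0 5
       if lo > 0 then (lo : Int) else -1) := by
  have hr : PySem.List.pyRange 0 (([0, 1000, 4000, 14000, 64000] : List Int).length : Int) 1
      = [0, 1, 2, 3, 4] := by decide
  rw [hr]
  have gv2 : ([0, 1000, 4000, 14000, 64000] : List Int)[Int.toNat 2] = 4000 := rfl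
  have gv3 : ([0, 1000, 4000, 14000, 64000] : List Int)[Int.toNat 3] = 14000 := rfl
  have gv4 : ([0, 1000, 4000, 14000, 64000] : List Int)[Int.toNat 4] = 64000 := rfl
  rcases lt_or_ge v 0 with h0 | h0
  · rw [pvB_lt0 v h0]
    norm_num [PySem.List.pyGetD, PySem.List.pyIdx?, PySem.List.pyGet?, gv2, gv3, gv4,
      show ¬((0:Int) ≤ v) from by omega, show ¬((1000:Int) ≤ v) from by omega,
      show ¬((4000:Int) ≤ v) from by omega, show ¬((14000:Int) ≤ v) from by omega,
      show ¬((64000:Int) ≤ v) from by omega]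
  rcases lt_or_ge v 1000 with h1 | h1
  · rw [pvB_0 v h0 h1]
    norm_num [PySem.List.pyGetD, PySem.List.pyIdx?, PySem.List.pyGet?, gv2, gv3, gv4, h0,
      show ¬((1000:Int) ≤ v) from by omega, show ¬((4000:Int) ≤ v) from by omega,
      show ¬((14000:Int) ≤ v) from by omega, show ¬((64000:Int) ≤ v) from by omega]
  rcases lt_or_ge v 4000 with h2 | h2
  · rw [pvB_1 v h1 h2]
    norm_num [PySem.List.pyGetD, PySem.List.pyIdx?, PySem.List.pyGet?, gv2, gv3, gv4, h0, h1,
      show ¬((4000:Int) ≤ v) from by omega, show ¬((14000:Int) ≤ v) from by omega,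
      show ¬((64000:Int) ≤ v) from by omega]
  rcases lt_or_ge v 14000 with h3 | h3
  · rw [pvB_2 v h2 h3]
    norm_num [PySem.List.pyGetD, PySem.List.pyIdx?, PySem.List.pyGet?, gv2, gv3, gv4, h0,
      show (1000:Int) ≤ v from by omega, h2,
      show ¬((14000:Int) ≤ v) from by omega, show ¬((64000:Int) ≤ v) from by omega]
  rcases lt_or_ge v 64000 with h4 | h4
  · rw [pvB_3 v h3 h4]
    norm_num [PySem.List.pyGetD, PySem.List.pyIdx?, PySem.List.pyGet?, gv2, gv3, gv4, h0,
      show (1000:Int) ≤ v from by omega, show (4000:Int) ≤ v from by omega, h3,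
      show ¬((64000:Int) ≤ v) from by omega]
  · rw [pvB_4 v h4]
    norm_num [PySem.List.pyGetD, PySem.List.pyIdx?, PySem.List.pyGet?, gv2, gv3, gv4, h0,
      show (1000:Int) ≤ v from by omega, show (4000:Int) ≤ v from by omega,
      show (14000:Int) ≤ v from by omega, h4]

-- ===== VERDICT (by name: the statement is the Claim_ definition above) =====
theorem getEpisodeLevel_spec : Claim_equal_getEpisodeLevel := by
  intro userChara _ _
  unfold Spec_getEpisodeLevel getEpisodeLevel getEpisodeLevel_alt
  exact pv_core _
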